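-- pv_equiv track=rewrite | github.com/plturrell/aArabic | scripts/models/hf_model_card_extractor.py | determine_agent_types
-- ===== SOURCE A (Python) =====
-- from typing import Dict, List, Optional, Any
--
-- def determine_agent_types(categories: List[str]) -> List[str]:
--     """Determine which agent types this model supports"""
--     agent_types = set()
--
--     # Inference agents (all models)
--     agent_types.add("inference")
--
--     # Tool agents (for specific categories)
--     tool_categories = {"vector_search", "ocr_extraction", "relational", "graph"}
--     if any(cat in tool_categories for cat in categories):
--         agent_types.add("tool")
--
--     # Orchestrator agents (for reasoning/summarization)
--     orchestrator_categories = {"reasoning", "summarization"}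
--     if any(cat in orchestrator_categories for cat in categories):
--         agent_types.add("orchestrator")
--
--     return sorted(list(agent_types))
-- ===== SOURCE B (Python) =====
-- _AGENT_FOR_CATEGORY = {
--     "vector_search": "tool",
--     "ocr_extraction": "tool",
--     "relational": "tool",
--     "graph": "tool",
--     "reasoning": "orchestrator",
--     "summarization": "orchestrator",
-- }
--
-- def determine_agent_types(categories):
--     agent_types = {"inference"}
--     for cat in categories:
--         agent_type = _AGENT_FOR_CATEGORY.get(cat)
--         if agent_type is not None:
--             agent_types.add(agent_type)
--     return sorted(agent_types)
-- ===== Notes on version B (the rewrite author's own statement) =====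
-- stated objective: idiomatic
-- what changed: Replaced the two independent any() scans over the input with one single-pass loop driven by a precomputed category->agent-type table, accumulating into a set seeded with 'inference'.
import Mathlib
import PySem

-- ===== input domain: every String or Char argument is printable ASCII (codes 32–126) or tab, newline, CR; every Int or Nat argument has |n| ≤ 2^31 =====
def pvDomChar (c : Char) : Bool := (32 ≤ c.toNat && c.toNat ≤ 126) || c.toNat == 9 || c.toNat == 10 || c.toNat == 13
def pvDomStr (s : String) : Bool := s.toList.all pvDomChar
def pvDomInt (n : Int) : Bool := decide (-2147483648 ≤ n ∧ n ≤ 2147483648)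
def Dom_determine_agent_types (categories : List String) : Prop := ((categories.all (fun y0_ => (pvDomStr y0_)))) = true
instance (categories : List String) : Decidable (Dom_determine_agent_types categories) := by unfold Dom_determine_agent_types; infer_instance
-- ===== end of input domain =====

-- B replaces A's two independent any-scans with one table-driven pass over the categories (idiomatic; same cost).


-- ===== PORT A =====
def determine_agent_types (categories : List String) : List String :=
  let agent_types : PySem.Set String := PySem.Set.add PySem.Set.empty "inference"
  let tool_categories : PySem.Set String :=
    PySem.Set.ofList ["vector_search", "ocr_extraction", "relational", "graph"]
  let agent_types :=
    if categories.any (fun cat => PySem.Set.contains tool_categories cat) then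
      PySem.Set.add agent_types "tool" else agent_types
  let orchestrator_categories : PySem.Set String :=
    PySem.Set.ofList ["reasoning", "summarization"]
  let agent_types :=
    if categories.any (fun cat => PySem.Set.contains orchestrator_categories cat) then
      PySem.Set.add agent_types "orchestrator" else agent_types
  PySem.List.sorted agent_types (fun x => x) false

-- ===== PORT B =====
-- the module-level dict literal _AGENT_FOR_CATEGORY of Source B
def pvAgentTable : PySem.Dict String String :=
  PySem.Dict.ofList
    [("vector_search", "tool"), ("ocr_extraction", "tool"), ("relational", "tool"),
     ("graph", "tool"), ("reasoning", "orchestrator"), ("summarization", "orchestrator")]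

def determine_agent_types_alt (categories : List String) : List String :=
  let agent_types :=
    categories.foldl
      (fun acc cat =>
        match PySem.Dict.get? pvAgentTable cat with
        | some t => PySem.Set.add acc t
        | none => acc)
      (PySem.Set.add PySem.Set.empty "inference")
  PySem.List.sorted agent_types (fun x => x) false

-- ===== PRECONDITION & SPEC =====
def Spec_determine_agent_types (categories : List String) (out : List String) : Prop := out = determine_agent_types_alt categories
instance (categories : List String) (out : List String) : Decidable (Spec_determine_agent_types categories out) := by unfold Spec_determine_agent_types; infer_instance

-- ===== CLAIM (what is proved, stated in full; the proofs are below) =====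
def Claim_equal_determine_agent_types : Prop := ∀ (categories : List String), Dom_determine_agent_types categories → Spec_determine_agent_types categories (determine_agent_types categories)

-- ===== LEMMAS AND PROOFS =====

-- the table lookup characterised on an arbitrary key
theorem get?_pvAgentTable (c : String) :
    PySem.Dict.get? pvAgentTable c =
      if c = "vector_search" ∨ c = "ocr_extraction" ∨ c = "relational" ∨ c = "graph" then
        some "tool"
      else if c = "reasoning" ∨ c = "summarization" then some "orchestrator"
      else none := by
  rw [show pvAgentTable =
      ((((((PySem.Dict.empty.insert "vector_search" "tool").insert "ocr_extraction" "tool").insert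
        "relational" "tool").insert "graph" "tool").insert "reasoning" "orchestrator").insert
        "summarization" "orchestrator") from by decide]
  simp only [PySem.Dict.get?_insert, PySem.Dict.get?_empty]
  split_ifs <;> simp_all

theorem get?_pvAgentTable_eq_some (c y : String) :
    PySem.Dict.get? pvAgentTable c = some y ↔
      ((c = "vector_search" ∨ c = "ocr_extraction" ∨ c = "relational" ∨ c = "graph") ∧ y = "tool") ∨
      ((c = "reasoning" ∨ c = "summarization") ∧ y = "orchestrator") := by
  rw [get?_pvAgentTable]
  split_ifs with h1 h2 <;> aesop

-- membership in B's accumulated set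
theorem mem_foldB (l : List String) (acc : PySem.Set String) (y : String) :
    (y ∈ l.foldl
        (fun acc cat =>
          match PySem.Dict.get? pvAgentTable cat with
          | some t => PySem.Set.add acc t
          | none => acc) acc) ↔
      y ∈ acc ∨ ∃ c ∈ l, PySem.Dict.get? pvAgentTable c = some y := by
  induction l generalizing acc with
  | nil => simp
  | cons c l ih =>
    simp only [List.foldl_cons, ih]
    cases h : PySem.Dict.get? pvAgentTable c with
    | none => simp [h]
      
    | some t =>
      simp only [PySem.Set.mem_add, List.mem_cons]
      constructor
      · rintro ((hy | rfl) | ⟨d, hd, hget⟩)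
        · exact Or.inl hy
        · exact Or.inr ⟨c, Or.inl rfl, h⟩
        · exact Or.inr ⟨d, Or.inr hd, hget⟩
      · rintro (hy | ⟨d, (rfl | hd), hget⟩)
        · exact Or.inl (Or.inl hy)
        · rw [h] at hget; exact Or.inl (Or.inr (Option.some.inj hget).symm)
        · exact Or.inr ⟨d, hd, hget⟩

theorem nodup_foldB (l : List String) (acc : PySem.Set String) (h : acc.Nodup) :
    (l.foldl
        (fun acc cat =>
          match PySem.Dict.get? pvAgentTable cat with
          | some t => PySem.Set.add acc t
          | none => acc) acc).Nodup := by
  induction l generalizing acc with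
  | nil => exact h
  | cons c l ih =>
    simp only [List.foldl_cons]
    cases hg : PySem.Dict.get? pvAgentTable c with
    | none => exact ih _ h
    | some t => exact ih _ (PySem.Set.nodup_add acc t h)

theorem determine_agent_types_eq (categories : List String) :
    determine_agent_types categories = determine_agent_types_alt categories := by
  unfold determine_agent_types determine_agent_types_alt
  apply PySem.List.sorted_eq_sorted_of_perm _ _ _ (fun a b => id)
  by_cases ht : (categories.any fun cat =>
      PySem.Set.contains (PySem.Set.ofList ["vector_search", "ocr_extraction", "relational", "graph"]) cat) = true <;>
  by_cases ho : (categories.any fun cat =>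
      PySem.Set.contains (PySem.Set.ofList ["reasoning", "summarization"]) cat) = true <;>
  first
  | rw [if_pos ht, if_pos ho]
  | rw [if_pos ht, if_neg ho]
  | rw [if_neg ht, if_pos ho]
  | rw [if_neg ht, if_neg ho]
  all_goals
  · rw [List.perm_ext_iff_of_nodup (by decide) (nodup_foldB _ _ (by decide))]
    simp only [List.any_eq_true, PySem.Set.contains_iff, PySem.Set.mem_ofList, List.mem_cons,
      List.not_mem_nil, or_false, not_exists, not_and, not_or] at ht ho
    intro y
    rw [mem_foldB]
    simp only [get?_pvAgentTable_eq_some, PySem.Set.mem_add, PySem.Set.empty, List.not_mem_nil,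
      false_or]
    constructor
    · intro hy
      aesop
    · intro hy
      aesop

-- ===== VERDICT (by name: the statement is the Claim_ definition above) =====
theorem determine_agent_types_spec : Claim_equal_determine_agent_types := by
  intro categories _
  unfold Spec_determine_agent_types
  exact determine_agent_types_eq categories
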